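-- pv_equiv track=rewrite | github.com/peabody124/PosePipeline | pose_pipeline/utils/tracking_evaluation.py | compute_consecutive_frames
-- ===== SOURCE A (Python) =====
-- def compute_consecutive_frames(unique_ids, all_track_ids):
--
--     consecutive_frames_cnt = {id:0 for id in unique_ids}
--     consecutive_frame_list = {id:[] for id in unique_ids}
--     start_index = {id:0 for id in unique_ids}
--     stop_index = {id:-1 for id in unique_ids}
--
--     total_tracks = len(all_track_ids)
--
--     # Iterate through the ids present in each frame
--     for i,id_list in enumerate(all_track_ids):
--
--         # Of all unique IDs present in the video,
--         # look at the ones not currently in the frame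
--         for missing_id in (unique_ids - set(id_list)):
--             # If these IDs have appeared in at least 1 frame previously
--             if consecutive_frames_cnt[missing_id] > 0:
--                 # Set the number of consecutive frames to 0 (since it is
--                 # not in the current frame)
--                 consecutive_frames_cnt[missing_id] = 0
--                 # Save the indices of the start and end frames that the
--                 # id showed up in consecutively
--                 stop_index[missing_id] = i-1
--                 consecutive_frame_list[missing_id].append([start_index[missing_id],stop_index[missing_id]])
--                 # Reset the start index and stop index
--                 start_index[missing_id] = -1
--
--         # Look at the IDs present in the frame
--         for present_id in id_list:
--
--             # If the number of consecutive frames for the current ID is 0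
--             # then the current index is the new starting index (since it
--             # is now in frame)
--             if consecutive_frames_cnt[present_id] == 0:
--                 start_index[present_id] = i
--
--             # Increment the number of consecutive frames the current ID has appeared in
--             consecutive_frames_cnt[present_id] += 1
--
--
--     # Go through track IDs present at the end of the video and append the first frame of
--     # their appearance and the final frame index to the consecutive frame list
--     for track_id in consecutive_frame_list:
--         if start_index[track_id] != -1:
--             consecutive_frame_list[track_id].append([start_index[track_id],total_tracks-1])
--
--     return consecutive_frame_list
-- ===== SOURCE B (Python) =====
-- def compute_consecutive_frames(unique_ids, all_track_ids):
--     # Bucket, per id, the indices of the frames it appears in (one pass over the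
--     # frames), then split each bucket into maximal runs of consecutive indices.
--     total_tracks = len(all_track_ids)
--     frames = {uid: [] for uid in unique_ids}
--     for i, id_list in enumerate(all_track_ids):
--         for uid in set(id_list):
--             frames[uid].append(i)
--     return {uid: _runs(frames[uid], total_tracks) for uid in unique_ids}
--
--
-- def _runs(fs, total_tracks):
--     # fs: strictly increasing frame indices; an id observed in no frame is
--     # reported as one interval spanning the whole video, as A does.
--     if not fs:
--         return [[0, total_tracks - 1]]
--     out = []
--     s = p = fs[0]
--     for f in fs[1:]:
--         if f != p + 1:
--             out.append([s, p])
--             s = f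
--         p = f
--     out.append([s, p])
--     return out
-- ===== Notes on version B (the rewrite author's own statement) =====
-- stated objective: faster
-- what changed: A sweeps all unique ids for every frame updating per-id counters/start/stop dicts; B makes one pass bucketing each id's frame indices and then splits each bucket into maximal consecutive runs (ids never observed get the whole-video interval, as A returns).
-- outside the precondition, e.g. on compute_consecutive_frames({1}, [[2]]): A raises KeyError, B raises KeyError
import Mathlib
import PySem

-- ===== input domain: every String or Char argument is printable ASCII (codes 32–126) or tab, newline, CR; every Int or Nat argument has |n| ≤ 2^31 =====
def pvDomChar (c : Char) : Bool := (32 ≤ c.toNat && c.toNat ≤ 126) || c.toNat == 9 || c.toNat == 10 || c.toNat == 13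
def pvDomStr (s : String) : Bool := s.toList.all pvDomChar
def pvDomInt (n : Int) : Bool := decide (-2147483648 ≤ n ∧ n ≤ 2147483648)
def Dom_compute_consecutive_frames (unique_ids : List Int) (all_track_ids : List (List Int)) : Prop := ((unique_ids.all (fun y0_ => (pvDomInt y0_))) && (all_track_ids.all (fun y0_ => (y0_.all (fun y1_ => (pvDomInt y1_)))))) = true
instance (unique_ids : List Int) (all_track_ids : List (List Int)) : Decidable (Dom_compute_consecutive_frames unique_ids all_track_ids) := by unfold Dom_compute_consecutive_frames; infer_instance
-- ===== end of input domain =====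

-- B replaces A's per-frame scan of all unique ids by one pass bucketing each id's
-- frame indices, then splits each bucket into maximal consecutive runs (faster; an id
-- observed in no frame is reported as one interval over the whole video, as A does).

-- ===== PORT A =====
-- state: (consecutive_frames_cnt, consecutive_frame_list, start_index, stop_index)
abbrev pvAState := PySem.Dict Int Int × PySem.Dict Int (List (List Int)) × PySem.Dict Int Int × PySem.Dict Int Int

def pvAInit (unique_ids : List Int) : pvAState :=
  (unique_ids.foldl (fun d id => d.insert id 0) PySem.Dict.empty,
   unique_ids.foldl (fun d id => d.insert id ([] : List (List Int))) PySem.Dict.empty,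
   unique_ids.foldl (fun d id => d.insert id 0) PySem.Dict.empty,
   unique_ids.foldl (fun d id => d.insert id (-1)) PySem.Dict.empty)

-- body of "for missing_id in (unique_ids - set(id_list)): …"
def pvAMissStep (i : Int) (st : pvAState) (m : Int) : pvAState :=
  if 0 < st.1.getD m 0 then
    let cnt := st.1.insert m 0
    let stop := st.2.2.2.insert m (i - 1)
    let cfl := st.2.1.insert m (st.2.1.getD m [] ++ [[st.2.2.1.getD m 0, stop.getD m 0]])
    let start := st.2.2.1.insert m (-1)
    (cnt, cfl, start, stop)
  else st

-- body of "for present_id in id_list: …"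
def pvAPresStep (i : Int) (st : pvAState) (p : Int) : pvAState :=
  let start := if st.1.getD p 0 == 0 then st.2.2.1.insert p i else st.2.2.1
  let cnt := st.1.insert p (st.1.getD p 0 + 1)
  (cnt, st.2.1, start, st.2.2.2)

-- body of "for i, id_list in enumerate(all_track_ids): …"
def pvAFrameStep (unique_ids : List Int) (st : pvAState) (pr : Int × List Int) : pvAState :=
  let st1 := (PySem.Set.diff unique_ids (PySem.Set.ofList pr.2)).foldl (pvAMissStep pr.1) st
  pr.2.foldl (pvAPresStep pr.1) st1

def compute_consecutive_frames (unique_ids : List Int) (all_track_ids : List (List Int)) : List (Int × List (List Int)) :=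
  let total_tracks : Int := all_track_ids.length
  let st := (PySem.List.enumerate all_track_ids 0).foldl (pvAFrameStep unique_ids) (pvAInit unique_ids)
  -- "for track_id in consecutive_frame_list: …"
  let final := st.2.1.keys.foldl
    (fun d tid =>
      if st.2.2.1.getD tid 0 ≠ -1 then
        d.insert tid (d.getD tid [] ++ [[st.2.2.1.getD tid 0, total_tracks - 1]])
      else d)
    st.2.1
  final.items

-- ===== PORT B =====
-- helper _runs: split a strictly increasing index list into maximal consecutive runs
def pvRunStep (acc : List (List Int) × Int × Int) (f : Int) : List (List Int) × Int × Int :=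
  if f ≠ acc.2.2 + 1 then (acc.1 ++ [[acc.2.1, acc.2.2]], f, f) else (acc.1, acc.2.1, f)

def pv_runs (fs : List Int) (total_tracks : Int) : List (List Int) :=
  match fs with
  | [] => [[0, total_tracks - 1]]
  | f0 :: rest =>
    let t := rest.foldl pvRunStep ([], f0, f0)
    t.1 ++ [[t.2.1, t.2.2]]

def compute_consecutive_frames_alt (unique_ids : List Int) (all_track_ids : List (List Int)) : List (Int × List (List Int)) :=
  let total_tracks : Int := all_track_ids.length
  let frames0 : PySem.Dict Int (List Int) := unique_ids.foldl (fun d uid => d.insert uid []) PySem.Dict.empty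
  let frames := (PySem.List.enumerate all_track_ids 0).foldl
    (fun d pr => (PySem.Set.ofList pr.2).foldl (fun d uid => d.insert uid (d.getD uid [] ++ [pr.1])) d)
    frames0
  unique_ids.map (fun uid => (uid, pv_runs (frames.getD uid []) total_tracks))

-- ===== PRECONDITION & SPEC =====
-- unique_ids renders a Python set, so it holds distinct elements (Nodup); and A raises
-- KeyError when a frame contains an id absent from unique_ids, so those inputs are excluded.
def Pre_compute_consecutive_frames (unique_ids : List Int) (all_track_ids : List (List Int)) : Prop :=
  unique_ids.Nodup ∧ ∀ fr ∈ all_track_ids, ∀ x ∈ fr, x ∈ unique_ids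
instance (unique_ids : List Int) (all_track_ids : List (List Int)) : Decidable (Pre_compute_consecutive_frames unique_ids all_track_ids) := by unfold Pre_compute_consecutive_frames; infer_instance

def pvWitness_compute_consecutive_frames : List Int × List (List Int) := ([1, 2], [[1], [1, 2], [], [2]])

def Spec_compute_consecutive_frames (unique_ids : List Int) (all_track_ids : List (List Int)) (out : List (Int × List (List Int))) : Prop := out = compute_consecutive_frames_alt unique_ids all_track_ids
instance (unique_ids : List Int) (all_track_ids : List (List Int)) (out : List (Int × List (List Int))) : Decidable (Spec_compute_consecutive_frames unique_ids all_track_ids out) := by unfold Spec_compute_consecutive_frames; infer_instance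

-- ===== CLAIM (what is proved, stated in full; the proofs are below) =====
def Claim_equal_compute_consecutive_frames : Prop := ∀ (unique_ids : List Int) (all_track_ids : List (List Int)), Dom_compute_consecutive_frames unique_ids all_track_ids → Pre_compute_consecutive_frames unique_ids all_track_ids → Spec_compute_consecutive_frames unique_ids all_track_ids (compute_consecutive_frames unique_ids all_track_ids)

-- ===== LEMMAS AND PROOFS =====

-- per-id view of A's dict state: (cnt, runs, start) at one id (stop never reaches the output)
def pvRead (st : pvAState) (id : Int) : Int × List (List Int) × Int :=
  (st.1.getD id 0, st.2.1.getD id [], st.2.2.1.getD id 0)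

-- per-id effect of one frame of A's main loop
def pvStepId (id : Int) (q : Int × List (List Int) × Int) (pr : Int × List Int) : Int × List (List Int) × Int :=
  if id ∈ pr.2 then (q.1 + (pr.2.count id : Int), q.2.1, if q.1 = 0 then pr.1 else q.2.2)
  else if 0 < q.1 then (0, q.2.1 ++ [[q.2.2, pr.1 - 1]], -1)
  else q

def pvMissUpd (i : Int) (q : Int × List (List Int) × Int) : Int × List (List Int) × Int :=
  if 0 < q.1 then (0, q.2.1 ++ [[q.2.2, i - 1]], -1) else q

-- indices (from s) of the frames containing id
def pvOccs (id : Int) (s : Int) : List (List Int) → List Int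
  | [] => []
  | fr :: rest => (if id ∈ fr then [s] else []) ++ pvOccs id (s + 1) rest

-- A's tail appending [start, total-1] when start ≠ -1, per id
def pvFin (q : Int × List (List Int) × Int) (last : Int) : List (List Int) :=
  if q.2.2 ≠ -1 then q.2.1 ++ [[q.2.2, last]] else q.2.1

-- invariant tying A's per-id state after frames 0..s-1 to the run-splitting fold on its occurrence list
def pvInv (s : Int) (fs : List Int) (q : Int × List (List Int) × Int) : Prop :=
  match fs with
  | [] => q = (0, [], 0)
  | f0 :: rest =>
    let r := rest.foldl pvRunStep ([], f0, f0)
    0 ≤ r.2.1 ∧ r.2.2 < s ∧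
      (if r.2.2 = s - 1 then 0 < q.1 ∧ q.2.1 = r.1 ∧ q.2.2 = r.2.1
       else q.1 = 0 ∧ q.2.1 = r.1 ++ [[r.2.1, r.2.2]] ∧ q.2.2 = -1)

lemma pv_foldl_insert_const_getD {ν : Type} (u : List Int) (d : PySem.Dict Int ν) (c v : ν) (id : Int) :
    (u.foldl (fun d x => d.insert x c) d).getD id v = if id ∈ u then c else d.getD id v := by
  induction u generalizing d with
  | nil => simp
  | cons x rest ih =>
    simp only [List.foldl_cons, ih, PySem.Dict.getD_insert, List.mem_cons]
    by_cases h1 : id ∈ rest <;> by_cases h2 : id = x <;> simp [h1, h2]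

lemma pvRead_init (u : List Int) (id : Int) : pvRead (pvAInit u) id = (0, [], 0) := by
  simp [pvRead, pvAInit, pv_foldl_insert_const_getD]

lemma pv_miss_step_ne (i m id : Int) (st : pvAState) (h : m ≠ id) :
    pvRead (pvAMissStep i st m) id = pvRead st id := by
  have h' : id ≠ m := fun hh => h hh.symm
  unfold pvAMissStep pvRead
  split
  · simp [PySem.Dict.getD_insert, h']
  · rfl

lemma pv_miss_fold_not_mem (M : List Int) (i id : Int) (st : pvAState) (h : id ∉ M) :
    pvRead (M.foldl (pvAMissStep i) st) id = pvRead st id := by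
  induction M generalizing st with
  | nil => rfl
  | cons m rest ih =>
    simp only [List.mem_cons, not_or] at h
    rw [List.foldl_cons, ih _ h.2, pv_miss_step_ne i m id st (fun hh => h.1 hh.symm)]

lemma pv_miss_fold_mem (M : List Int) (i id : Int) (st : pvAState) (hnd : M.Nodup) (h : id ∈ M) :
    pvRead (M.foldl (pvAMissStep i) st) id = pvMissUpd i (pvRead st id) := by
  induction M generalizing st with
  | nil => cases h
  | cons m rest ih =>
    rcases List.nodup_cons.mp hnd with ⟨hm, hrest⟩
    rcases List.mem_cons.mp h with h1 | h1
    · subst h1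
      rw [List.foldl_cons, pv_miss_fold_not_mem rest i id _ hm]
      unfold pvAMissStep pvMissUpd pvRead
      split
      · simp
      · rfl
    · have hne : m ≠ id := fun hh => hm (hh ▸ h1)
      rw [List.foldl_cons]
      rw [ih _ hrest h1, pv_miss_step_ne i m id st hne]

lemma pv_pres_step_ne (i p id : Int) (st : pvAState) (h : p ≠ id) :
    pvRead (pvAPresStep i st p) id = pvRead st id ∧ (pvAPresStep i st p).1.getD id 0 = st.1.getD id 0 := by
  have h' : id ≠ p := fun hh => h hh.symm
  unfold pvAPresStep pvRead
  constructor <;> split <;> simp [PySem.Dict.getD_insert, h']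

lemma pv_pres_fold (fr : List Int) (i id : Int) (st : pvAState) (h0 : 0 ≤ st.1.getD id 0) :
    pvRead (fr.foldl (pvAPresStep i) st) id =
      ((pvRead st id).1 + (fr.count id : Int), (pvRead st id).2.1,
        if id ∈ fr ∧ (pvRead st id).1 = 0 then i else (pvRead st id).2.2) := by
  induction fr generalizing st with
  | nil => simp [pvRead]
  | cons p rest ih =>
    by_cases hp : p = id
    · subst hp
      have hread : pvRead (pvAPresStep i st p) p =
          (st.1.getD p 0 + 1, st.2.1.getD p [], if st.1.getD p 0 = 0 then i else st.2.2.1.getD p 0) := by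
        unfold pvAPresStep pvRead
        by_cases hz : st.1.getD p 0 = 0
        · simp [hz]
        · simp [hz]
      have h0' : 0 ≤ (pvAPresStep i st p).1.getD p 0 := by
        rw [show (pvAPresStep i st p).1.getD p 0 = (pvRead (pvAPresStep i st p) p).1 from rfl, hread]
        simp only []
        omega
      rw [List.foldl_cons, ih _ h0', hread]
      by_cases hz : st.1.getD p 0 = 0 <;> by_cases hm : p ∈ rest <;>
        simp only [pvRead, List.count_cons, hz, hm, Prod.ext_iff, beq_iff_eq, if_true, if_false,
          and_true, true_and, List.mem_cons, or_true, true_or] <;>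
        simp_all <;> omega
    · have hne : id ≠ p := fun hh => hp hh.symm
      have hpe := pv_pres_step_ne i p id st hp
      rw [List.foldl_cons, ih _ (by rw [hpe.2]; exact h0), hpe.1]
      simp [hne, hp, List.mem_cons]

lemma pvStepId_cnt_nonneg (id : Int) (q : Int × List (List Int) × Int) (pr : Int × List Int)
    (h : 0 ≤ q.1) : 0 ≤ (pvStepId id q pr).1 := by
  unfold pvStepId
  split
  · simp; positivity
  · split <;> simp [h]

lemma pv_bigA (frames : List (List Int)) (u : List Int) (id : Int) (hu : u.Nodup) (hid : id ∈ u) :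
    ∀ (s : Int) (st : pvAState), (∀ fr ∈ frames, ∀ x ∈ fr, x ∈ u) → 0 ≤ st.1.getD id 0 →
      pvRead ((PySem.List.enumerate frames s).foldl (pvAFrameStep u) st) id =
        (PySem.List.enumerate frames s).foldl (pvStepId id) (pvRead st id) := by
  induction frames with
  | nil => intro s st _ _; simp [PySem.List.enumerate_nil]
  | cons fr rest ih =>
    intro s st hsub h0
    rw [PySem.List.enumerate_cons]
    simp only [List.foldl_cons]
    have hframe : pvRead (pvAFrameStep u st (s, fr)) id = pvStepId id (pvRead st id) (s, fr) := by
      unfold pvAFrameStep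
      by_cases hmem : id ∈ fr
      · have hnot : id ∉ PySem.Set.diff u (PySem.Set.ofList fr) := by
          intro hc
          have := (PySem.Set.mem_diff _ _ _).mp hc
          exact this.2 ((PySem.Set.mem_ofList _ _).mpr hmem)
        rw [show (fr.foldl (pvAPresStep s) ((PySem.Set.diff u (PySem.Set.ofList fr)).foldl (pvAMissStep s) st)) = _ from rfl]
        have hmf := pv_miss_fold_not_mem (PySem.Set.diff u (PySem.Set.ofList fr)) s id st hnot
        have h0' : 0 ≤ ((PySem.Set.diff u (PySem.Set.ofList fr)).foldl (pvAMissStep s) st).1.getD id 0 := by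
          have : ((PySem.Set.diff u (PySem.Set.ofList fr)).foldl (pvAMissStep s) st).1.getD id 0 = (pvRead st id).1 := congrArg (·.1) hmf
          rw [this]; exact h0
        rw [pv_pres_fold fr s id _ h0', hmf]
        unfold pvStepId
        simp [hmem]
      · have hmemd : id ∈ PySem.Set.diff u (PySem.Set.ofList fr) := by
          refine (PySem.Set.mem_diff _ _ _).mpr ⟨hid, fun hc => hmem ((PySem.Set.mem_ofList _ _).mp hc)⟩
        have hnd : (PySem.Set.diff u (PySem.Set.ofList fr)).Nodup := PySem.Set.nodup_diff u (PySem.Set.ofList fr) hu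
        have hmf := pv_miss_fold_mem (PySem.Set.diff u (PySem.Set.ofList fr)) s id st hnd hmemd
        have h0' : 0 ≤ ((PySem.Set.diff u (PySem.Set.ofList fr)).foldl (pvAMissStep s) st).1.getD id 0 := by
          have : ((PySem.Set.diff u (PySem.Set.ofList fr)).foldl (pvAMissStep s) st).1.getD id 0 = (pvMissUpd s (pvRead st id)).1 := congrArg (·.1) hmf
          rw [this]; unfold pvMissUpd; split
          · simp
          · exact h0
        rw [pv_pres_fold fr s id _ h0', hmf]
        have hcnt : (fr.count id : Int) = 0 := by simp [List.count_eq_zero_of_not_mem hmem]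
        unfold pvStepId pvMissUpd
        simp [hmem, hcnt]
    have h0'' : 0 ≤ (pvAFrameStep u st (s, fr)).1.getD id 0 := by
      have : (pvAFrameStep u st (s, fr)).1.getD id 0 = (pvStepId id (pvRead st id) (s, fr)).1 := congrArg (·.1) hframe
      rw [this]; exact pvStepId_cnt_nonneg id _ _ h0
    rw [ih (s + 1) _ (fun fr2 h2 => hsub fr2 (List.mem_cons_of_mem _ h2)) h0'', hframe]

-- cfl keys are untouched by the present loop and preserved by the missing loop
lemma pv_pres_fold_cfl (fr : List Int) (i : Int) (st : pvAState) :
    (fr.foldl (pvAPresStep i) st).2.1 = st.2.1 := by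
  induction fr generalizing st with
  | nil => rfl
  | cons p rest ih => rw [List.foldl_cons, ih]; rfl

lemma pv_miss_fold_cfl_keys (M : List Int) (i : Int) (st : pvAState)
    (h : ∀ m ∈ M, m ∈ st.2.1.keys) :
    ((M.foldl (pvAMissStep i) st).2.1).keys = st.2.1.keys := by
  induction M generalizing st with
  | nil => rfl
  | cons m rest ih =>
    rw [List.foldl_cons]
    have hk : ((pvAMissStep i st m).2.1).keys = st.2.1.keys := by
      unfold pvAMissStep
      split
      · simp only
        exact PySem.Dict.keys_insert_of_contains _ _ ((PySem.Dict.contains_iff_mem_keys _ _).mpr (h m (List.mem_cons_self)))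
      · rfl
    rw [ih _ (fun x hx => hk ▸ h x (List.mem_cons_of_mem _ hx)), hk]

lemma pv_big_cfl_keys (frames : List (List Int)) (u : List Int) :
    ∀ (s : Int) (st : pvAState), st.2.1.keys = u →
      ((PySem.List.enumerate frames s).foldl (pvAFrameStep u) st).2.1.keys = u := by
  induction frames with
  | nil => intro s st h; simpa [PySem.List.enumerate_nil] using h
  | cons fr rest ih =>
    intro s st h
    rw [PySem.List.enumerate_cons, List.foldl_cons]
    apply ih
    unfold pvAFrameStep
    rw [pv_pres_fold_cfl]
    rw [pv_miss_fold_cfl_keys _ _ _ (fun m hm => by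
      rw [h]; exact ((PySem.Set.mem_diff _ _ _).mp hm).1)]
    exact h

-- final loop: value at each id, and keys unchanged
lemma pv_final_step_ne {d : PySem.Dict Int (List (List Int))} {startD : PySem.Dict Int Int} {T tid id : Int}
    (h : tid ≠ id) :
    ((if startD.getD tid 0 ≠ -1 then d.insert tid (d.getD tid [] ++ [[startD.getD tid 0, T]]) else d)).getD id [] = d.getD id [] := by
  have h' : id ≠ tid := fun hh => h hh.symm
  split <;> simp [PySem.Dict.getD_insert, h']

lemma pv_final_fold_not_mem (u : List Int) (d : PySem.Dict Int (List (List Int))) (startD : PySem.Dict Int Int) (T id : Int)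
    (h : id ∉ u) :
    (u.foldl (fun d tid => if startD.getD tid 0 ≠ -1 then d.insert tid (d.getD tid [] ++ [[startD.getD tid 0, T]]) else d) d).getD id []
      = d.getD id [] := by
  induction u generalizing d with
  | nil => rfl
  | cons t rest ih =>
    simp only [List.mem_cons, not_or] at h
    rw [List.foldl_cons, ih _ h.2, pv_final_step_ne (fun hh => h.1 hh.symm)]

lemma pv_final_fold_mem (u : List Int) (d : PySem.Dict Int (List (List Int))) (startD : PySem.Dict Int Int) (T id : Int)
    (hnd : u.Nodup) (h : id ∈ u) :
    (u.foldl (fun d tid => if startD.getD tid 0 ≠ -1 then d.insert tid (d.getD tid [] ++ [[startD.getD tid 0, T]]) else d) d).getD id []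
      = pvFin (0, d.getD id [], startD.getD id 0) T := by
  induction u generalizing d with
  | nil => cases h
  | cons t rest ih =>
    rcases List.nodup_cons.mp hnd with ⟨ht, hrest⟩
    rcases List.mem_cons.mp h with h1 | h1
    · subst h1
      rw [List.foldl_cons, pv_final_fold_not_mem rest _ startD T id ht]
      unfold pvFin
      split
      · simp
      · rfl
    · have hne : t ≠ id := fun hh => ht (hh ▸ h1)
      rw [List.foldl_cons, ih _ hrest h1, pv_final_step_ne hne]

lemma pv_final_fold_keys (u : List Int) (d : PySem.Dict Int (List (List Int))) (startD : PySem.Dict Int Int) (T : Int)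
    (h : ∀ t ∈ u, t ∈ d.keys) :
    (u.foldl (fun d tid => if startD.getD tid 0 ≠ -1 then d.insert tid (d.getD tid [] ++ [[startD.getD tid 0, T]]) else d) d).keys = d.keys := by
  induction u generalizing d with
  | nil => rfl
  | cons t rest ih =>
    rw [List.foldl_cons]
    have hk : ((if startD.getD t 0 ≠ -1 then d.insert t (d.getD t [] ++ [[startD.getD t 0, T]]) else d)).keys = d.keys := by
      split
      · exact PySem.Dict.keys_insert_of_contains _ _ ((PySem.Dict.contains_iff_mem_keys _ _).mpr (h t (List.mem_cons_self)))
      · rfl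
    rw [ih _ (fun x hx => hk ▸ h x (List.mem_cons_of_mem _ hx)), hk]

-- B side: value of the buckets dict at each id
lemma pv_b_inner_not_mem (S : List Int) (i id : Int) (d : PySem.Dict Int (List Int)) (h : id ∉ S) :
    (S.foldl (fun d uid => d.insert uid (d.getD uid [] ++ [i])) d).getD id [] = d.getD id [] := by
  induction S generalizing d with
  | nil => rfl
  | cons x rest ih =>
    simp only [List.mem_cons, not_or] at h
    have h' : id ≠ x := h.1
    rw [List.foldl_cons, ih _ h.2]
    simp [PySem.Dict.getD_insert, h']

lemma pv_b_inner (S : List Int) (i id : Int) (d : PySem.Dict Int (List Int)) (hnd : S.Nodup) :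
    (S.foldl (fun d uid => d.insert uid (d.getD uid [] ++ [i])) d).getD id []
      = d.getD id [] ++ (if id ∈ S then [i] else []) := by
  induction S generalizing d with
  | nil => simp
  | cons x rest ih =>
    rcases List.nodup_cons.mp hnd with ⟨hx, hrest⟩
    by_cases h1 : id = x
    · subst h1
      rw [List.foldl_cons, pv_b_inner_not_mem rest i id _ hx]
      simp

    · rw [List.foldl_cons, ih _ hrest]
      have : id ∈ x :: rest ↔ id ∈ rest := by simp [List.mem_cons, h1]
      simp [PySem.Dict.getD_insert, h1, this]

lemma pv_b_outer (frames : List (List Int)) (id : Int) :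
    ∀ (s : Int) (d : PySem.Dict Int (List Int)),
      ((PySem.List.enumerate frames s).foldl
        (fun d pr => (PySem.Set.ofList pr.2).foldl (fun d uid => d.insert uid (d.getD uid [] ++ [pr.1])) d) d).getD id []
      = d.getD id [] ++ pvOccs id s frames := by
  induction frames with
  | nil => intro s d; simp [PySem.List.enumerate_nil, pvOccs]
  | cons fr rest ih =>
    intro s d
    rw [PySem.List.enumerate_cons, List.foldl_cons, ih]
    rw [pv_b_inner _ s id d (PySem.Set.nodup_ofList fr)]
    have : (id ∈ PySem.Set.ofList fr) ↔ id ∈ fr := PySem.Set.mem_ofList _ _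
    simp only [pvOccs, this, List.append_assoc]

-- run-splitting fold over an appended element
lemma pvRunStep_append (rest : List Int) (f0 x : Int) :
    (rest ++ [x]).foldl pvRunStep ([], f0, f0) = pvRunStep (rest.foldl pvRunStep ([], f0, f0)) x := by
  rw [List.foldl_append]; rfl

-- the invariant is preserved by one frame of A's per-id step
lemma pvInv_step (id s : Int) (fr : List Int) (fs : List Int) (q : Int × List (List Int) × Int)
    (hs : 0 ≤ s) (h : pvInv s fs q) :
    pvInv (s + 1) (fs ++ (if id ∈ fr then [s] else [])) (pvStepId id q (s, fr)) := by
  by_cases hmem : id ∈ fr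
  · have hcnt : 0 < (fr.count id : Int) := by exact_mod_cast List.count_pos_iff.mpr hmem
    cases fs with
    | nil =>
      simp only [pvInv] at h
      subst h
      simp only [hmem, if_pos, pvInv, pvStepId, List.nil_append]
      simp [hmem, hs, List.foldl_nil]
    | cons f0 rest =>
      simp only [pvInv] at h
      set r := rest.foldl pvRunStep ([], f0, f0) with hr
      obtain ⟨hr1, hr2, hbr⟩ := h
      rw [if_pos hmem, show (f0 :: rest) ++ [s] = f0 :: (rest ++ [s]) from rfl]
      simp only [pvInv]
      rw [pvRunStep_append, ← hr]
      by_cases hopen : r.2.2 = s - 1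
      · rw [if_pos hopen] at hbr
        obtain ⟨hq1, hq2, hq3⟩ := hbr
        have hstep : pvRunStep r s = (r.1, r.2.1, s) := by
          unfold pvRunStep; rw [if_neg (by omega)]
        rw [hstep]
        unfold pvStepId
        rw [if_pos hmem]
        dsimp only
        refine ⟨hr1, by omega, ?_⟩
        rw [if_pos (by omega)]
        exact ⟨by omega, by simpa using hq2, by rw [if_neg (by omega)]; exact hq3⟩
      · rw [if_neg hopen] at hbr
        obtain ⟨hq1, hq2, hq3⟩ := hbr
        have hstep : pvRunStep r s = (r.1 ++ [[r.2.1, r.2.2]], s, s) := by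
          unfold pvRunStep; rw [if_pos (by omega)]
        rw [hstep]
        unfold pvStepId
        rw [if_pos hmem]
        dsimp only
        refine ⟨hs, by omega, ?_⟩
        rw [if_pos (by omega)]
        refine ⟨by omega, by simpa using hq2, ?_⟩
        rw [if_pos hq1]
  · rw [if_neg hmem, List.append_nil]
    cases fs with
    | nil =>
      simp only [pvInv] at h
      subst h
      unfold pvStepId
      simp [hmem, pvInv]
    | cons f0 rest =>
      simp only [pvInv] at h ⊢
      set r := rest.foldl pvRunStep ([], f0, f0) with hr
      obtain ⟨hr1, hr2, hbr⟩ := h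
      refine ⟨hr1, by omega, ?_⟩
      by_cases hopen : r.2.2 = s - 1
      · rw [if_pos hopen] at hbr
        obtain ⟨hq1, hq2, hq3⟩ := hbr
        rw [if_neg (by omega)]
        unfold pvStepId
        rw [if_neg hmem, if_pos hq1]
        exact ⟨rfl, by simp [hq2, hq3, hopen], rfl⟩
      · rw [if_neg hopen] at hbr
        obtain ⟨hq1, hq2, hq3⟩ := hbr
        rw [if_neg (by omega)]
        unfold pvStepId
        rw [if_neg hmem, if_neg (by omega)]
        exact ⟨hq1, hq2, hq3⟩

-- the crux: A's per-id fold, finalized, is B's run splitting of the occurrence list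
lemma pv_crux (id : Int) (frames : List (List Int)) :
    ∀ (s : Int) (fs : List Int) (q : Int × List (List Int) × Int), 0 ≤ s → pvInv s fs q →
      pvFin ((PySem.List.enumerate frames s).foldl (pvStepId id) q) (s + (frames.length : Int) - 1)
        = pv_runs (fs ++ pvOccs id s frames) (s + (frames.length : Int)) := by
  induction frames with
  | nil =>
    intro s fs q hs h
    simp only [PySem.List.enumerate_nil, List.foldl_nil, pvOccs, List.append_nil, List.length_nil,
      Int.natCast_zero, add_zero]
    cases fs with
    | nil =>
      simp only [pvInv] at h; subst h
      simp [pvFin, pv_runs]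
    | cons f0 rest =>
      simp only [pvInv] at h
      obtain ⟨hr1, hr2, hbr⟩ := h
      by_cases hopen : (rest.foldl pvRunStep ([], f0, f0)).2.2 = s - 1
      · rw [if_pos hopen] at hbr
        obtain ⟨hq1, hq2, hq3⟩ := hbr
        unfold pvFin pv_runs
        rw [if_pos (by omega)]
        simp only []
        rw [hq2, hq3, hopen]
      · rw [if_neg hopen] at hbr
        obtain ⟨hq1, hq2, hq3⟩ := hbr
        unfold pvFin pv_runs
        rw [if_neg (by simp [hq3])]
        simp only []
        exact hq2
  | cons fr rest ih =>
    intro s fs q hs h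
    rw [PySem.List.enumerate_cons, List.foldl_cons]
    have hlen : s + ((fr :: rest).length : Int) = (s + 1) + (rest.length : Int) := by
      simp [List.length_cons]; ring
    rw [hlen]
    have := ih (s + 1) (fs ++ (if id ∈ fr then [s] else [])) (pvStepId id q (s, fr)) (by omega)
      (pvInv_step id s fr fs q hs h)
    rw [this]
    congr 1
    simp [pvOccs, List.append_assoc]

-- initial state satisfies the invariant at s = 0 with no occurrences
lemma pvInv_init : pvInv 0 [] (0, [], 0) := by simp [pvInv]

-- keys of the initial cfl dict
lemma pv_init_cfl_keys (u : List Int) (hu : u.Nodup) : (pvAInit u).2.1.keys = u := by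
  unfold pvAInit
  simp only []
  rw [PySem.Dict.keys_foldl_insert]
  simp [PySem.Dict.keys_empty]
  rw [PySem.Set.update_nil_left]
  exact PySem.Set.ofList_eq_self_of_nodup u hu

-- ===== VERDICT (by name: the statement is the Claim_ definition above) =====
theorem compute_consecutive_frames_spec : Claim_equal_compute_consecutive_frames := by
  intro u frames _ hpre
  obtain ⟨hu, hsub⟩ := hpre
  unfold Spec_compute_consecutive_frames
  unfold compute_consecutive_frames compute_consecutive_frames_alt
  simp only []
  set T : Int := (frames.length : Int) with hT
  set st := (PySem.List.enumerate frames 0).foldl (pvAFrameStep u) (pvAInit u) with hst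
  -- keys of cfl after the main loop
  have hkeys : st.2.1.keys = u := pv_big_cfl_keys frames u 0 (pvAInit u) (pv_init_cfl_keys u hu)
  -- keys after the final loop
  have hkeys2 : (st.2.1.keys.foldl
      (fun d tid => if st.2.2.1.getD tid 0 ≠ -1 then d.insert tid (d.getD tid [] ++ [[st.2.2.1.getD tid 0, T - 1]]) else d)
      st.2.1).keys = u := by
    rw [pv_final_fold_keys _ _ _ _ (fun t ht => by rw [hkeys] at ht ⊢; exact ht)]
    exact hkeys
  rw [PySem.Dict.items_eq_map_keys _ (by rw [hkeys2]; exact hu) []]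
  rw [hkeys2]
  apply List.map_congr_left
  intro id hid
  -- value of the final dict at id
  rw [hkeys]
  rw [pv_final_fold_mem u st.2.1 st.2.2.1 (T - 1) id hu hid]
  -- A's per-id state
  have hA : pvRead st id = (PySem.List.enumerate frames 0).foldl (pvStepId id) (0, [], 0) := by
    rw [hst, pv_bigA frames u id hu hid 0 (pvAInit u) hsub (by rw [show (pvAInit u).1.getD id 0 = (pvRead (pvAInit u) id).1 from rfl, pvRead_init])]
    rw [pvRead_init]
  have hfin : pvFin (0, st.2.1.getD id [], st.2.2.1.getD id 0) (T - 1)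
      = pvFin (pvRead st id) (T - 1) := by
    unfold pvFin pvRead; simp only []
  rw [hfin, hA, hT]
  have := pv_crux id frames 0 [] (0, [], 0) le_rfl pvInv_init
  simp only [List.nil_append, zero_add] at this
  rw [this]
  -- B's per-id value
  have hB : ((PySem.List.enumerate frames 0).foldl
      (fun d pr => (PySem.Set.ofList pr.2).foldl (fun d uid => d.insert uid (d.getD uid [] ++ [pr.1])) d)
      (u.foldl (fun d uid => d.insert uid []) PySem.Dict.empty)).getD id [] = pvOccs id 0 frames := by
    rw [pv_b_outer frames id 0]
    rw [pv_foldl_insert_const_getD]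
    simp [hid]
  rw [hB]
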